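-- pv_equiv track=rewrite | github.com/MRI-Lab-Graz/bids_apps_runner | scripts/prism_hpc.py | _drop_runtime_flags
-- ===== SOURCE A (Python) =====
-- def _drop_runtime_flags(options, flag_names):
--     """Drop flags (and optional values) from tokenized CLI options."""
--     cleaned = []
--     i = 0
--     flags = set(flag_names)
--     while i < len(options):
--         token = str(options[i])
--         if token in flags:
--             if i + 1 < len(options) and not str(options[i + 1]).startswith("-"):
--                 i += 2
--             else:
--                 i += 1
--             continue
--
--         if token.startswith("--") and "=" in token:
--             left = token.split("=", 1)[0]
--             if left in flags:
--                 i += 1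
--                 continue
--
--         cleaned.append(token)
--         i += 1
--
--     return cleaned
-- ===== SOURCE B (Python) =====
-- def _drop_runtime_flags(options, flag_names):
--     """Drop flags (and optional values) from tokenized CLI options.
--
--     A lookahead-free state machine: fold over the tokens once, carrying a
--     'pending' flag meaning 'the previous token was a flag that may consume a
--     value'. A pending flag swallows the current token unless it starts with
--     '-', in which case the token is examined normally.
--     """
--     flags = frozenset(flag_names)
--     cleaned = []
--     pending = False
--     for tok in options:
--         token = str(tok)
--         if pending:
--             pending = False
--             if not token.startswith("-"):
--                 continue  # consumed as the preceding flag's value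
--         if token in flags:
--             pending = True
--             continue
--         if token.startswith("--") and "=" in token and token.split("=", 1)[0] in flags:
--             continue
--         cleaned.append(token)
--     return cleaned
-- ===== Notes on version B (the rewrite author's own statement) =====
-- stated objective: alternative
-- what changed: B replaces A's index-and-lookahead while loop (peeking at options[i+1] and jumping the index by 1 or 2) with a lookahead-free left fold over the tokens that carries a 'pending' state flag meaning 'the previous token was a flag that may consume a value'; a pending flag swallows the current non-dash token, otherwise the token is classified normally.
import Mathlib
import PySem

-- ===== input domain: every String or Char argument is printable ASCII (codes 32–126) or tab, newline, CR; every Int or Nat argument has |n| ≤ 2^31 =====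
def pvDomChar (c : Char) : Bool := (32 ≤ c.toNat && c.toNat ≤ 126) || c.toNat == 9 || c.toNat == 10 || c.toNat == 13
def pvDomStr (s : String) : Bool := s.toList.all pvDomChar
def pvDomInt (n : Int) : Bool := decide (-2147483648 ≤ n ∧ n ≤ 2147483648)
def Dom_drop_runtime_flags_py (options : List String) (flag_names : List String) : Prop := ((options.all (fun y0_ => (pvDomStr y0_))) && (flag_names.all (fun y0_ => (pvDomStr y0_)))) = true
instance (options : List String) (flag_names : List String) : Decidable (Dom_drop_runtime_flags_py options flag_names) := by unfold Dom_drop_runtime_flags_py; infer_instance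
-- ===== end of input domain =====

-- B replaces A's index-with-lookahead while loop by a lookahead-free state-machine fold carrying a 'pending value' flag — same cost, different decomposition.


-- ===== PORT A =====
-- A's while loop: index i over options, peeking at options[i+1], appending survivors to `cleaned`.
-- token.split("=", 1)[0]: splitMax? is `some` (sep "=" ≠ "") and split yields ≥ 1 piece, so getD/headD never fire.
def pvA_loop (options : List String) (flags : PySem.Set String) (i : Nat) (cleaned : List String) : List String :=
  if h : i < options.length then
    let token := options[i]
    if PySem.Set.contains flags token then
      if h2 : i + 1 < options.length then
        if !(PySem.Str.startswith options[i + 1] "-") then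
          pvA_loop options flags (i + 2) cleaned
        else
          pvA_loop options flags (i + 1) cleaned
      else
        pvA_loop options flags (i + 1) cleaned
    else
      if PySem.Str.startswith token "--" && PySem.Str.isIn "=" token then
        let left := ((PySem.Str.splitMax? token "=" 1).getD []).headD ""
        if PySem.Set.contains flags left then
          pvA_loop options flags (i + 1) cleaned
        else
          pvA_loop options flags (i + 1) (cleaned ++ [token])
      else
        pvA_loop options flags (i + 1) (cleaned ++ [token])
  else cleaned
termination_by options.length - i

def drop_runtime_flags_py (options : List String) (flag_names : List String) : List String :=
  pvA_loop options (PySem.Set.ofList flag_names) 0 []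

-- ===== PORT B =====
-- B's loop body: one token at a time, state = (pending, cleaned); no index, no lookahead.
-- (str() on a str is the identity, so `token` is the element itself.)
def pvB_step (flags : PySem.Set String) (st : Bool × List String) (token : String) : Bool × List String :=
  if st.1 && !(PySem.Str.startswith token "-") then
    (false, st.2)          -- consumed as the preceding flag's value
  else if PySem.Set.contains flags token then
    (true, st.2)
  else if PySem.Str.startswith token "--" && PySem.Str.isIn "=" token
      && PySem.Set.contains flags (((PySem.Str.splitMax? token "=" 1).getD []).headD "") then
    (false, st.2)
  else
    (false, st.2 ++ [token])

def drop_runtime_flags_py_alt (options : List String) (flag_names : List String) : List String :=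
  (options.foldl (pvB_step (PySem.Set.ofList flag_names)) (false, [])).2

-- ===== PRECONDITION & SPEC =====
def Spec_drop_runtime_flags_py (options : List String) (flag_names : List String) (out : List String) : Prop := out = drop_runtime_flags_py_alt options flag_names
instance (options : List String) (flag_names : List String) (out : List String) : Decidable (Spec_drop_runtime_flags_py options flag_names out) := by unfold Spec_drop_runtime_flags_py; infer_instance

-- ===== CLAIM (what is proved, stated in full; the proofs are below) =====
def Claim_equal_drop_runtime_flags_py : Prop := ∀ (options : List String) (flag_names : List String), Dom_drop_runtime_flags_py options flag_names → Spec_drop_runtime_flags_py options flag_names (drop_runtime_flags_py options flag_names)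

-- ===== LEMMAS AND PROOFS =====

-- the "--x=y with x a flag" test, shared by both sources
def pvEqTok (flags : PySem.Set String) (t : String) : Bool :=
  PySem.Str.startswith t "--" && PySem.Str.isIn "=" t
    && PySem.Set.contains flags (((PySem.Str.splitMax? t "=" 1).getD []).headD "")

-- common recursive specification of the survivors of a suffix
def pvARec (flags : PySem.Set String) : List String → List String
  | [] => []
  | t :: rest =>
    if PySem.Set.contains flags t then
      match rest with
      | u :: rest' =>
        if !(PySem.Str.startswith u "-") then pvARec flags rest' else pvARec flags (u :: rest')
      | [] => []
    else if pvEqTok flags t then pvARec flags rest else t :: pvARec flags rest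
termination_by l => l.length
decreasing_by all_goals simp

theorem pvARec_fv {flags : PySem.Set String} {t u : String} (rest : List String)
    (hm : t ∈ flags) (hsw : PySem.Chars.startswith u.toList ['-'] = false) :
    pvARec flags (t :: u :: rest) = pvARec flags rest := by
  simp [pvARec, hm, hsw]

theorem pvARec_f {flags : PySem.Set String} {t u : String} (rest : List String)
    (hm : t ∈ flags) (hsw : PySem.Chars.startswith u.toList ['-'] = true) :
    pvARec flags (t :: u :: rest) = pvARec flags (u :: rest) := by
  simp [pvARec, hm, hsw]

theorem pvARec_f1 {flags : PySem.Set String} {t : String} (hm : t ∈ flags) :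
    pvARec flags [t] = [] := by
  simp [pvARec, hm]

theorem pvARec_eq {flags : PySem.Set String} {t : String} (rest : List String)
    (hm : t ∉ flags) (heq : pvEqTok flags t = true) :
    pvARec flags (t :: rest) = pvARec flags rest := by
  cases rest <;> simp [pvARec, hm, heq]

theorem pvARec_keep {flags : PySem.Set String} {t : String} (rest : List String)
    (hm : t ∉ flags) (heq : pvEqTok flags t = false) :
    pvARec flags (t :: rest) = t :: pvARec flags rest := by
  cases rest <;> simp [pvARec, hm, heq]

theorem pvA_loop_eq (options : List String) (flags : PySem.Set String) (i : Nat) (cleaned : List String) :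
    pvA_loop options flags i cleaned = cleaned ++ pvARec flags (options.drop i) := by
  fun_induction pvA_loop options flags i cleaned with
  | case1 i cleaned h token hcont h2 hsw ih =>
    have hm : options[i] ∈ flags := by simpa using hcont
    have hsw' : PySem.Chars.startswith options[i + 1].toList ['-'] = false := by
      simpa using hsw
    rw [ih, List.drop_eq_getElem_cons h, List.drop_eq_getElem_cons h2,
      pvARec_fv _ hm hsw']
  | case2 i cleaned h token hcont h2 hsw ih =>
    have hm : options[i] ∈ flags := by simpa using hcont
    have hsw' : PySem.Chars.startswith options[i + 1].toList ['-'] = true := by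
      simpa using hsw
    rw [ih, List.drop_eq_getElem_cons h, List.drop_eq_getElem_cons h2,
      pvARec_f _ hm hsw', ← List.drop_eq_getElem_cons h2]
  | case3 i cleaned h token hcont h2 ih =>
    have hm : options[i] ∈ flags := by simpa using hcont
    rw [ih, List.drop_eq_getElem_cons h,
      List.drop_eq_nil_of_le (by omega : options.length ≤ i + 1),
      pvARec_f1 hm]
    simp [pvARec]
  | case4 i cleaned h token hcont hsw left hleft ih =>
    have hm : options[i] ∉ flags := by simpa using hcont
    have hsw' : (PySem.Str.startswith options[i] "--" && PySem.Str.isIn "=" options[i]) = true := hsw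
    have hleft' : PySem.Set.contains flags (((PySem.Str.splitMax? options[i] "=" 1).getD []).headD "") = true := hleft
    have heqt : pvEqTok flags options[i] = true := by
      unfold pvEqTok
      obtain ⟨h1, h2⟩ := Bool.and_eq_true_iff.mp hsw'
      rw [h1, h2, hleft']
      rfl
    rw [ih, List.drop_eq_getElem_cons h, pvARec_eq _ hm heqt]
  | case5 i cleaned h token hcont hsw left hleft ih =>
    have hm : options[i] ∉ flags := by simpa using hcont
    have hleft' : PySem.Set.contains flags (((PySem.Str.splitMax? options[i] "=" 1).getD []).headD "") = false := by
      rcases Bool.eq_false_or_eq_true (PySem.Set.contains flags (((PySem.Str.splitMax? options[i] "=" 1).getD []).headD "")) with hb | hb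
      · exact absurd hb hleft
      · exact hb
    have heqf : pvEqTok flags options[i] = false := by
      unfold pvEqTok
      rw [hleft']
      simp
    rw [ih, List.drop_eq_getElem_cons h, pvARec_keep _ hm heqf]
    simp
    rfl
  | case6 i cleaned h token hcont hsw ih =>
    have hm : options[i] ∉ flags := by simpa using hcont
    have heqf : pvEqTok flags options[i] = false := by
      unfold pvEqTok
      rcases Bool.eq_false_or_eq_true (PySem.Str.startswith options[i] "--") with hb | hb
      · have hIn : PySem.Str.isIn "=" options[i] = false := by
          rcases Bool.eq_false_or_eq_true (PySem.Str.isIn "=" options[i]) with hc | hc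
          · exact absurd (by rw [hb, hc]; rfl : (PySem.Str.startswith options[i] "--" && PySem.Str.isIn "=" options[i]) = true) hsw
          · exact hc
        rw [hIn]
        simp
      · rw [hb]
        simp
    rw [ih, List.drop_eq_getElem_cons h, pvARec_keep _ hm heqf]
    simp
    rfl
  | case7 i cleaned h => simp [List.drop_eq_nil_of_le (by omega : options.length ≤ i), pvARec]

-- when the token starts with '-', a pending flag behaves exactly like no pending flag
theorem pvB_step_dash (flags : PySem.Set String) (acc : List String) (token : String)
    (hsw : PySem.Chars.startswith token.toList ['-'] = true) :
    pvB_step flags (true, acc) token = pvB_step flags (false, acc) token := by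
  simp [pvB_step, hsw]

-- the fold started with no pending flag computes the common recursive specification
theorem pvB_fold_eq (flags : PySem.Set String) (n : Nat) :
    ∀ (l : List String) (acc : List String), l.length ≤ n →
    (l.foldl (pvB_step flags) (false, acc)).2 = acc ++ pvARec flags l := by
  induction n with
  | zero =>
    intro l acc hlen
    have hnil : l = [] := List.eq_nil_of_length_eq_zero (by omega)
    subst hnil
    simp [pvARec]
  | succ n IHn =>
    intro l acc hlen
    cases l with
    | nil => simp [pvARec]
    | cons t rest =>
      rw [List.foldl_cons]
      by_cases hm : t ∈ flags
      · have hstep : pvB_step flags (false, acc) t = (true, acc) := by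
          simp [pvB_step, hm]
        rw [hstep]
        cases rest with
        | nil => simp [pvARec_f1 hm]
        | cons u rest' =>
          rw [List.foldl_cons]
          by_cases hsw : PySem.Chars.startswith u.toList ['-'] = true
          · rw [pvB_step_dash flags acc u hsw, ← List.foldl_cons,
              IHn (u :: rest') acc (by simp at hlen ⊢; omega), pvARec_f _ hm hsw]
          · have hswf : PySem.Chars.startswith u.toList ['-'] = false :=
              Bool.eq_false_iff.mpr hsw
            have hstep2 : pvB_step flags (true, acc) u = (false, acc) := by
              simp [pvB_step, hswf]
            rw [hstep2, IHn rest' acc (by simp at hlen ⊢; omega), pvARec_fv _ hm hswf]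
      · by_cases heq : pvEqTok flags t = true
        · have heq' := heq
          simp [pvEqTok] at heq'
          have hstep : pvB_step flags (false, acc) t = (false, acc) := by
            simp [pvB_step, hm]
            tauto
          rw [hstep, IHn rest acc (by simp at hlen ⊢; omega), pvARec_eq _ hm heq]
        · have heqf : pvEqTok flags t = false := Bool.eq_false_iff.mpr heq
          have heqf' := heq
          simp [pvEqTok] at heqf'
          have hstep : pvB_step flags (false, acc) t = (false, acc ++ [t]) := by
            simp [pvB_step, hm]
            intro h1 h2
            tauto
          rw [hstep, IHn rest (acc ++ [t]) (by simp at hlen ⊢; omega),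
            pvARec_keep _ hm heqf, List.append_assoc]
          simp

-- ===== VERDICT (by name: the statement is the Claim_ definition above) =====
theorem drop_runtime_flags_py_spec : Claim_equal_drop_runtime_flags_py := by
  intro options flag_names _
  unfold Spec_drop_runtime_flags_py drop_runtime_flags_py drop_runtime_flags_py_alt
  rw [pvA_loop_eq, pvB_fold_eq (PySem.Set.ofList flag_names) options.length options [] le_rfl]
  simp
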